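-- pv_equiv track=rewrite | github.com/YashGupta404/PharmaLens | backend/app/services/ocr.py | is_prescription_image
-- ===== SOURCE A (Python) =====
-- from typing import Tuple, Optional, List, Dict, Any
--
-- def is_prescription_image(labels: List[str]) -> bool:
--     """
--     Check if the image appears to be a prescription based on labels.
--
--     Args:
--         labels: List of detected labels
--
--     Returns:
--         True if likely a prescription
--     """
--     prescription_keywords = [
--         "document", "paper", "text", "handwriting", "receipt",
--         "prescription", "medical", "medicine", "pharmacy",
--         "font", "writing", "letter", "number"
--     ]
--
--     labels_lower = [label.lower() for label in labels]
--
--     matches = sum(1 for kw in prescription_keywords if any(kw in label for label in labels_lower))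
--
--     return matches >= 2
-- ===== SOURCE B (Python) =====
-- def is_prescription_image(labels):
--     """
--     Check if the image appears to be a prescription based on labels.
--     """
--     prescription_keywords = [
--         "document", "paper", "text", "handwriting", "receipt",
--         "prescription", "medical", "medicine", "pharmacy",
--         "font", "writing", "letter", "number"
--     ]
--     # One lowercased newline-joined haystack; keywords contain no newline,
--     # so nothing matches across a label boundary.
--     text = "\n".join(labels).lower()
--     # No counter: find the FIRST keyword present, then search the remaining
--     # keywords for a SECOND one; two hits suffice, so stop immediately.
--     for i, kw in enumerate(prescription_keywords):
--         if kw in text: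
--             for kw2 in prescription_keywords[i + 1:]:
--                 if kw2 in text:
--                     return True
--             return False
--     return False
-- ===== Notes on version B (the rewrite author's own statement) =====
-- stated objective: alternative
-- what changed: B joins the labels once into a single lowercased newline-separated haystack and replaces A's count-then-threshold over all keywords by an early-exiting two-stage search: find the first keyword present, then look for a second one among the remaining keywords.
import Mathlib
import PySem

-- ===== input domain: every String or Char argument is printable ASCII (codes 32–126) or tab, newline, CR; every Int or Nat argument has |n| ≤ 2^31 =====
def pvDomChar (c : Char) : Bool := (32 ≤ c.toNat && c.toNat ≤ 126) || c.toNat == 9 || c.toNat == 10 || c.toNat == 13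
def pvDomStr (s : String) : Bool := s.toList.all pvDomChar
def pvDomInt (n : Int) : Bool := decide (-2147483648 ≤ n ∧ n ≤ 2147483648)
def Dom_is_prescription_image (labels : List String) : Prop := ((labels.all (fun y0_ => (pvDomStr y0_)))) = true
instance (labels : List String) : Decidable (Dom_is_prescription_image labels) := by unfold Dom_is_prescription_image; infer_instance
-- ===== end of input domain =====

-- B replaces A's count-all-keywords-then-threshold by an early-exiting two-stage
-- search (first hit, then a second hit among the remaining keywords) over one
-- lowercased newline-joined haystack (objective: alternative).

-- ===== PORT A =====
def prescription_keywords : List String :=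
  ["document", "paper", "text", "handwriting", "receipt",
   "prescription", "medical", "medicine", "pharmacy",
   "font", "writing", "letter", "number"]

def is_prescription_image (labels : List String) : Bool :=
  let labels_lower := labels.map PySem.Str.lower
  let m := prescription_keywords.foldl
    (fun acc kw => if labels_lower.any (fun label => PySem.Str.isIn kw label) then acc + 1 else acc)
    (0 : Nat)
  decide (2 ≤ m)

-- ===== PORT B =====
def prescription_keywords_alt : List String :=
  ["document", "paper", "text", "handwriting", "receipt",
   "prescription", "medical", "medicine", "pharmacy",
   "font", "writing", "letter", "number"]

-- inner loop: `for kw2 in prescription_keywords[i+1:]: if kw2 in text: return True` / `return False`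
def pvFindSecond (text : String) : List String → Bool
  | [] => false
  | kw2 :: rest => if PySem.Str.isIn kw2 text then true else pvFindSecond text rest

-- outer loop: `for i, kw in enumerate(...)`; recursion tail = `prescription_keywords[i+1:]`
def pvFindFirst (text : String) : List String → Bool
  | [] => false
  | kw :: rest => if PySem.Str.isIn kw text then pvFindSecond text rest else pvFindFirst text rest

def is_prescription_image_alt (labels : List String) : Bool :=
  let text := PySem.Str.lower (PySem.Str.join "\n" labels)
  pvFindFirst text prescription_keywords_alt

-- ===== PRECONDITION & SPEC =====
def Spec_is_prescription_image (labels : List String) (out : Bool) : Prop := out = is_prescription_image_alt labels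
instance (labels : List String) (out : Bool) : Decidable (Spec_is_prescription_image labels out) := by unfold Spec_is_prescription_image; infer_instance

-- ===== CLAIM (what is proved, stated in full; the proofs are below) =====
def Claim_equal_is_prescription_image : Prop := ∀ (labels : List String), Dom_is_prescription_image labels → Spec_is_prescription_image labels (is_prescription_image labels)

-- ===== LEMMAS AND PROOFS =====

-- A keyword containing no `sep` is an infix of `a ++ sep :: b` iff it is an infix of a part.
theorem infix_append_cons_iff {α : Type} (sep : α) (a b kw : List α) (hsep : sep ∉ kw) :
    kw <:+: (a ++ sep :: b) ↔ kw <:+: a ∨ kw <:+: b := by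
  constructor
  · rintro ⟨s, t, heq⟩
    by_cases h1 : s.length + kw.length ≤ a.length
    · left
      have hpre : s ++ kw <+: a ++ sep :: b := ⟨t, by simpa [List.append_assoc] using heq⟩
      have hpre' : s ++ kw <+: a :=
        List.prefix_of_prefix_length_le hpre (List.prefix_append a (sep :: b))
          (by simpa using h1)
      exact ((List.suffix_append s kw).isInfix).trans hpre'.isInfix
    · by_cases h2 : a.length < s.length
      · right
        have hs : a <+: s := by
          refine List.prefix_of_prefix_length_le (List.prefix_append a (sep :: b))
            ⟨kw ++ t, by simpa [List.append_assoc] using heq⟩ (le_of_lt h2)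
        obtain ⟨s', rfl⟩ := hs
        have hlen : s' ≠ [] := by
          intro h; subst h; simp at h2
        have heq' : s' ++ kw ++ t = sep :: b := by
          have := heq
          simp only [List.append_assoc] at this ⊢
          exact List.append_cancel_left this
        cases s' with
        | nil => exact absurd rfl hlen
        | cons c s'' =>
          have hc : c = sep := by
            have := congrArg (fun l => l.head?) heq'; simpa using this
          have hb : s'' ++ kw ++ t = b := by
            have := congrArg List.tail heq'; simpa using this
          exact ⟨s'', t, hb⟩
      · -- s.length ≤ a.length < s.length + kw.length : sep lands inside kw, contradiction
        exfalso
        push Not at h1 h2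
        have hs : s <+: a :=
          List.prefix_of_prefix_length_le ⟨kw ++ t, by simpa [List.append_assoc] using heq⟩
            (List.prefix_append a (sep :: b)) h2
        obtain ⟨a', rfl⟩ := hs
        have heq' : kw ++ t = a' ++ sep :: b := by
          simp only [List.append_assoc] at heq
          exact List.append_cancel_left heq
        have hklen : a'.length < kw.length := by
          have := h1; simp at this; omega
        have hkw : kw = (a' ++ sep :: b).take kw.length := by
          exact List.prefix_iff_eq_take.mp ⟨t, heq'⟩
        have : kw = a' ++ (sep :: b).take (kw.length - a'.length) := by
          conv_lhs => rw [hkw]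
          rw [List.take_append, List.take_of_length_le (le_of_lt hklen)]
        have hmem : sep ∈ kw := by
          rw [this]
          have : kw.length - a'.length ≠ 0 := by omega
          cases hk : kw.length - a'.length with
          | zero => exact absurd hk this
          | succ n => simp
        exact hsep hmem
  · rintro (⟨s, t, rfl⟩ | ⟨s, t, rfl⟩)
    · exact ⟨s, t ++ sep :: b, by simp⟩
    · exact ⟨(a ++ sep :: s), t, by simp⟩

-- Substring search in the newline-joined text equals the per-label any-scan,
-- for a nonempty keyword that contains no newline.
theorem isIn_join (kw : List Char) (hne : kw ≠ []) (hsep : '\n' ∉ kw) (ls : List (List Char)) :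
    PySem.Chars.isIn kw (PySem.Chars.join ['\n'] ls) =
      ls.any (fun l => PySem.Chars.isIn kw l) := by
  induction ls with
  | nil =>
    simp [PySem.Chars.join_nil]
    rw [PySem.Chars.isIn_eq_false_iff]
    intro h
    exact hne (List.eq_nil_of_infix_nil h)
  | cons l rest ih =>
    cases rest with
    | nil => simp [PySem.Chars.join_singleton]
    | cons l' rest' =>
      rw [PySem.Chars.join_cons_cons]
      have : l ++ ['\n'] ++ PySem.Chars.join ['\n'] (l' :: rest')
          = l ++ '\n' :: PySem.Chars.join ['\n'] (l' :: rest') := by simp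
      rw [this]
      rcases h1 : PySem.Chars.isIn kw (l ++ '\n' :: PySem.Chars.join ['\n'] (l' :: rest')) with _ | _
      · rw [PySem.Chars.isIn_eq_false_iff] at h1
        rw [infix_append_cons_iff _ _ _ _ hsep] at h1
        push Not at h1
        have e1 : PySem.Chars.isIn kw l = false := PySem.Chars.isIn_eq_false_iff _ _ |>.mpr h1.1
        have e2 : PySem.Chars.isIn kw (PySem.Chars.join ['\n'] (l' :: rest')) = false :=
          PySem.Chars.isIn_eq_false_iff _ _ |>.mpr h1.2
        rw [e2] at ih
        simp [e1, ← ih]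
      · rw [PySem.Chars.isIn_iff_infix] at h1
        rw [infix_append_cons_iff _ _ _ _ hsep] at h1
        symm
        rcases h1 with h1 | h1
        · simp [List.any_cons, (PySem.Chars.isIn_iff_infix _ _).mpr h1]
        · have h2 := (PySem.Chars.isIn_iff_infix kw (PySem.Chars.join ['\n'] (l' :: rest'))).mpr h1
          rw [h2] at ih
          simp only [List.any_cons]
          rw [← List.any_cons, ← ih]
          simp

-- lowering commutes with the newline join (lowerChar fixes '\n')
theorem lower_join (ls : List (List Char)) :
    PySem.Chars.lower (PySem.Chars.join ['\n'] ls) =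
      PySem.Chars.join ['\n'] (ls.map PySem.Chars.lower) := by
  induction ls with
  | nil => simp [PySem.Chars.join_nil, PySem.Chars.lower]
  | cons l rest ih =>
    cases rest with
    | nil => simp [PySem.Chars.join_singleton]
    | cons l' rest' =>
      rw [PySem.Chars.join_cons_cons, List.map_cons, List.map_cons, PySem.Chars.join_cons_cons]
      rw [← List.map_cons, ← ih]
      simp [PySem.Chars.lower, show PySem.Chars.lowerChar '\n' = '\n' from by decide]

-- the per-keyword equality, for keywords of the fixed list
theorem key_eq (labels : List String) (kw : String)
    (hne : kw.toList ≠ []) (hsep : '\n' ∉ kw.toList) :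
    (labels.map PySem.Str.lower).any (fun label => PySem.Str.isIn kw label)
      = PySem.Str.isIn kw (PySem.Str.lower (PySem.Str.join "\n" labels)) := by
  have hstr : ("\n" : String).toList = ['\n'] := by decide
  rw [PySem.Str.isIn_eq, PySem.Str.toList_lower, PySem.Str.toList_join, hstr, lower_join,
    isIn_join kw.toList hne hsep]
  induction labels with
  | nil => simp
  | cons x xs ih =>
    simp only [List.map_cons, List.any_cons, ih]
    rw [PySem.Str.isIn_eq, PySem.Str.toList_lower]

-- B's inner loop is exactly `any` over the remaining keywords
theorem findSecond_eq_any (text : String) (l : List String) :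
    pvFindSecond text l = l.any (fun kw => PySem.Str.isIn kw text) := by
  induction l with
  | nil => rfl
  | cons kw rest ih =>
    simp only [pvFindSecond, List.any_cons, ih]
    by_cases h : PySem.Str.isIn kw text = true <;> simp [h]

-- A's counting fold equals `countP` (shifted by the accumulator)
theorem foldl_count (q : String → Bool) (l : List String) :
    ∀ acc : Nat,
      l.foldl (fun acc kw => if q kw then acc + 1 else acc) acc = acc + l.countP q := by
  induction l with
  | nil => intro acc; simp
  | cons kw rest ih =>
    intro acc
    by_cases h : q kw = true <;> simp [List.foldl_cons, List.countP_cons, h, ih] <;> omega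

-- count-then-threshold-at-2 equals find-first-then-find-second
theorem count_eq_firstSecond (text : String) (l : List String) :
    decide (2 ≤ l.countP (fun kw => PySem.Str.isIn kw text)) = pvFindFirst text l := by
  induction l with
  | nil => simp [pvFindFirst]
  | cons kw rest ih =>
    by_cases h : PySem.Str.isIn kw text = true
    · rw [pvFindFirst, if_pos h, List.countP_cons, if_pos h, findSecond_eq_any]
      rcases h2 : rest.any (fun kw => PySem.Str.isIn kw text) with _ | _
      · have hz : rest.countP (fun kw => PySem.Str.isIn kw text) = 0 := by
          rw [List.countP_eq_zero]
          intro a ha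
          simpa using List.any_eq_false.mp h2 a ha
        rw [hz]; decide
      · have hp : 0 < rest.countP (fun kw => PySem.Str.isIn kw text) := by
          rw [List.countP_pos_iff]
          simpa [List.any_eq_true] using h2
        simp only [decide_eq_true_eq]
        omega
    · rw [pvFindFirst, if_neg h, List.countP_cons, if_neg h, Nat.add_zero, ih]

-- ===== VERDICT (by name: the statement is the Claim_ definition above) =====
theorem is_prescription_image_spec : Claim_equal_is_prescription_image := by
  intro labels _
  show is_prescription_image labels = is_prescription_image_alt labels
  have hall : ∀ kw ∈ prescription_keywords, kw.toList ≠ [] ∧ ('\n' ∉ kw.toList) := by decide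
  have hfold :
      List.foldl (fun acc kw =>
          if (labels.map PySem.Str.lower).any (fun label => PySem.Str.isIn kw label)
          then acc + 1 else acc) (0 : Nat) prescription_keywords
        = List.foldl (fun acc kw =>
          if PySem.Str.isIn kw (PySem.Str.lower (PySem.Str.join "\n" labels))
          then acc + 1 else acc) (0 : Nat) prescription_keywords := by
    apply PySem.List.foldl_congr_mem
    intro acc kw hmem
    rw [key_eq labels kw (hall kw hmem).1 (hall kw hmem).2]
  simp only [is_prescription_image, is_prescription_image_alt]
  rw [hfold, foldl_count, Nat.zero_add, count_eq_firstSecond,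
    show prescription_keywords = prescription_keywords_alt from rfl]
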